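-- pv_equiv track=rewrite | github.com/VDnarendra/Sudoku | main.py | MAKEME
-- ===== SOURCE A (Python) =====
-- def MAKEME(lis):
-- 	s = ''
-- 	l=[]
-- 	for i in range(1,10):
-- 		if i in lis:
-- 			s+=str(i)+ ' '
-- 		else:
-- 			s+='  '
-- 		if i%3==0:
-- 			l+=[s]
-- 			s=''
-- 	return l
-- ===== SOURCE B (Python) =====
-- def MAKEME(lis):
--     def cell(i):
--         return str(i) + ' ' if i in lis else '  '
--     return [''.join(cell(g + k) for k in range(3)) for g in (1, 4, 7)]
-- ===== Notes on version B (the rewrite author's own statement) =====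
-- stated objective: simpler
-- what changed: Replaces the stateful accumulate-and-flush loop (running string s plus an i%3==0 flush into l) with direct per-row construction: each of the three rows is built independently by joining three cells from its group start.
import Mathlib
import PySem

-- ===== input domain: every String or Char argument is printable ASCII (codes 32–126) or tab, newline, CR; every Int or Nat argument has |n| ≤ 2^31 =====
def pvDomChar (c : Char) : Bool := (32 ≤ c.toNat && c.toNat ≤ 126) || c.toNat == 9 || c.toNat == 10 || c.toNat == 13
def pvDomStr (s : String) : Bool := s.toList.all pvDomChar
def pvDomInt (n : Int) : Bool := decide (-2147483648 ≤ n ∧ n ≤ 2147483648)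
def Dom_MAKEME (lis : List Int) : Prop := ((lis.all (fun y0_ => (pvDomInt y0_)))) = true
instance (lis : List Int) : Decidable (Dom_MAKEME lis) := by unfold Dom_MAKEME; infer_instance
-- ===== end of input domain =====

-- B drops A's running-string accumulator and modulo flush and builds each of the three rows directly; objective: simpler.

-- ===== PORT A =====
-- literal port of A's loop: state (s, l), flush s into l when i % 3 == 0
def MAKEME (lis : List Int) : List String :=
  (((PySem.List.pyRange 1 10 1).foldl
    (fun (st : String × List String) (i : Int) =>
      let s := if lis.contains i then st.1 ++ PySem.Int.toStr i ++ " " else st.1 ++ "  "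
      if PySem.Int.mod i 3 == 0 then ("", st.2 ++ [s]) else (s, st.2))
    ("", []))).2

-- ===== PORT B =====
-- each row built independently from its group start g by joining three cells
def MAKEME_altCell (lis : List Int) (i : Int) : String :=
  if lis.contains i then PySem.Int.toStr i ++ " " else "  "

def MAKEME_alt (lis : List Int) : List String :=
  [(1 : Int), 4, 7].map (fun g =>
    "".intercalate (((PySem.List.pyRange 0 3 1).map (fun k => MAKEME_altCell lis (g + k)))))

-- ===== PRECONDITION & SPEC =====
def Spec_MAKEME (lis : List Int) (out : List String) : Prop := out = MAKEME_alt lis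
instance (lis : List Int) (out : List String) : Decidable (Spec_MAKEME lis out) := by unfold Spec_MAKEME; infer_instance

-- ===== CLAIM (what is proved, stated in full; the proofs are below) =====
def Claim_equal_MAKEME : Prop := ∀ (lis : List Int), Dom_MAKEME lis → Spec_MAKEME lis (MAKEME lis)

-- ===== LEMMAS AND PROOFS =====

-- ===== VERDICT (by name: the statement is the Claim_ definition above) =====
theorem MAKEME_spec : Claim_equal_MAKEME := by
  intro lis _
  show MAKEME lis = MAKEME_alt lis
  unfold MAKEME MAKEME_alt MAKEME_altCell
  rw [show PySem.List.pyRange 1 10 1 = [1,2,3,4,5,6,7,8,9] from by decide,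
      show PySem.List.pyRange 0 3 1 = [0,1,2] from by decide]
  simp only [List.foldl_cons, List.foldl_nil, List.map_cons, List.map_nil, beq_iff_eq,
    (show Int.fmod 1 3 = 0 ↔ False by decide), (show Int.fmod 2 3 = 0 ↔ False by decide),
    (show Int.fmod 3 3 = 0 ↔ True by decide), (show Int.fmod 4 3 = 0 ↔ False by decide),
    (show Int.fmod 5 3 = 0 ↔ False by decide), (show Int.fmod 6 3 = 0 ↔ True by decide),
    (show Int.fmod 7 3 = 0 ↔ False by decide), (show Int.fmod 8 3 = 0 ↔ False by decide),
    (show Int.fmod 9 3 = 0 ↔ True by decide), if_true, if_false, PySem.Int.mod, Int.reduceAdd]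
  refine congrArg₂ List.cons ?_ (congrArg₂ List.cons ?_ (congrArg₂ List.cons ?_ rfl)) <;>
    split_ifs <;> rfl
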